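-- pv_equiv track=rewrite | github.com/SonOfDumitru/pythonProject | Sesiunea 16/generator.py | gen_even
-- ===== SOURCE A (Python) =====
-- def gen_even(n):
--     generated_number = 0
--     current_number = 0
--     while generated_number < n:
--         current_number += 1
--         if current_number %2 == 0:
--             yield current_number
--             generated_number += 1
-- ===== SOURCE B (Python) =====
-- def gen_even(n):
--     i = 0
--     while i < n:
--         i += 1
--         yield 2 * i
-- ===== Notes on version B (the rewrite author's own statement) =====
-- stated objective: simpler
-- what changed: B keeps a single counter and computes each even number directly by doubling it, instead of A's scanning every integer with a parity test and a second counter.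
import Mathlib
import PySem

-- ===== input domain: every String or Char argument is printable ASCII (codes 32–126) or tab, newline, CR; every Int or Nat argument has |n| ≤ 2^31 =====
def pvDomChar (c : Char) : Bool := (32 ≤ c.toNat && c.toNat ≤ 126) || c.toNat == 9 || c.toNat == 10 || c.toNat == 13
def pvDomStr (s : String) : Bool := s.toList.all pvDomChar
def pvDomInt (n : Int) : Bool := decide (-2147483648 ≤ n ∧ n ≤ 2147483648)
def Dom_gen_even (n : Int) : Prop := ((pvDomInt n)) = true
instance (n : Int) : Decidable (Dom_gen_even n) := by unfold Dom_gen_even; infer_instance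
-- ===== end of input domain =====

-- B yields the first n even numbers by direct arithmetic (2*i with one counter) instead of
-- A's scan over all integers with a parity filter and a second counter; same return value.

-- ===== PORT A =====
-- PySem.Int.mod with positive divisor 2 agrees with Lean's emod (used for termination/parity).
theorem pv_fmod_two (x : Int) : x.fmod 2 = x % 2 := by
  rw [Int.fmod_eq_emod]; norm_num

-- A's while loop: state (generated_number, current_number); each pass increments current_number,
-- yields it and bumps generated_number when it is even. Measure: two passes per yield.
def genEvenLoopA (n gen cur : Int) : List Int :=
  if gen < n then
    let cur' := cur + 1
    if PySem.Int.mod cur' 2 = 0 then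
      cur' :: genEvenLoopA n (gen + 1) cur'
    else
      genEvenLoopA n gen cur'
  else []
termination_by (2 * (n - gen).toNat + (if PySem.Int.mod cur 2 = 0 then 1 else 0))
decreasing_by
  all_goals simp only [PySem.Int.mod, pv_fmod_two] at *
  · rename_i h1
    rw [if_pos h1, if_neg (by omega : ¬ cur % 2 = 0)]; omega
  · rename_i h1
    rw [if_neg h1, if_pos (by omega : cur % 2 = 0)]; omega

def gen_even (n : Int) : List Int := genEvenLoopA n 0 0

-- ===== PORT B =====
-- B's while loop: single counter i; yields 2*(i+1) each pass.
def genEvenLoopB (n i : Int) : List Int :=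
  if i < n then (2 * (i + 1)) :: genEvenLoopB n (i + 1) else []
termination_by (n - i).toNat
decreasing_by omega

def gen_even_alt (n : Int) : List Int := genEvenLoopB n 0

-- ===== PRECONDITION & SPEC =====
def Spec_gen_even (n : Int) (out : List Int) : Prop := out = gen_even_alt n
instance (n : Int) (out : List Int) : Decidable (Spec_gen_even n out) := by unfold Spec_gen_even; infer_instance

-- ===== CLAIM (what is proved, stated in full; the proofs are below) =====
def Claim_equal_gen_even : Prop := ∀ (n : Int), Dom_gen_even n → Spec_gen_even n (gen_even n)

-- ===== LEMMAS AND PROOFS =====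

-- Invariant: at the top of each yield cycle of A, current_number = 2 * generated_number.
theorem genEvenLoopA_eq_B (n gen : Int) :
    genEvenLoopA n gen (2 * gen) = genEvenLoopB n gen := by
  by_cases h : gen < n
  · have hodd : ¬ (PySem.Int.mod (2 * gen + 1) 2 = 0) := by
      simp only [PySem.Int.mod, pv_fmod_two]; omega
    have heven : PySem.Int.mod (2 * gen + 1 + 1) 2 = 0 := by
      simp only [PySem.Int.mod, pv_fmod_two]; omega
    have h2 : 2 * gen + 1 + 1 = 2 * (gen + 1) := by ring
    rw [genEvenLoopA, if_pos h]
    simp only [if_neg hodd]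
    rw [genEvenLoopA, if_pos h]
    simp only [if_pos heven]
    rw [h2, genEvenLoopA_eq_B n (gen + 1)]
    conv_rhs => rw [genEvenLoopB]
    rw [if_pos h]
  · rw [genEvenLoopA, if_neg h, genEvenLoopB, if_neg h]
termination_by (n - gen).toNat
decreasing_by omega

-- ===== VERDICT (by name: the statement is the Claim_ definition above) =====
theorem gen_even_spec : Claim_equal_gen_even := by
  intro n _
  unfold Spec_gen_even gen_even gen_even_alt
  simpa using genEvenLoopA_eq_B n 0
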